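-- pv_equiv track=rewrite | github.com/vlladdrakk/hfnsurf-fork | muodata/repr.py | list_as_table
-- ===== SOURCE A (Python) =====
-- def list_as_table(lst, cols = 4):
--
-- 	res = []
--
-- 	col = 0
-- 	ln = []
--
-- 	for num in lst:
-- 		ln.append(num)
-- 		col += 1
--
-- 		if col>= cols:
--
-- 			col=0
-- 			res.append('\t'.join(ln))
-- 			ln = []
--
-- 	return('\n'.join(res))
-- ===== SOURCE B (Python) =====
-- def list_as_table(lst, cols=4):
--     step = cols if cols >= 1 else 1
--     rows = []
--     i = 0
--     while i + step <= len(lst):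
--         rows.append('\t'.join(lst[i:i+step]))
--         i += step
--     return '\n'.join(rows)
-- ===== Notes on version B (the rewrite author's own statement) =====
-- stated objective: simpler
-- what changed: Replaces A's element-by-element accumulator-and-counter loop with an index loop that slices one full row lst[i:i+step] at a time (step clamped to 1 for cols < 1); the trailing partial row is dropped by the loop condition i + step <= len(lst).
import Mathlib
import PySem

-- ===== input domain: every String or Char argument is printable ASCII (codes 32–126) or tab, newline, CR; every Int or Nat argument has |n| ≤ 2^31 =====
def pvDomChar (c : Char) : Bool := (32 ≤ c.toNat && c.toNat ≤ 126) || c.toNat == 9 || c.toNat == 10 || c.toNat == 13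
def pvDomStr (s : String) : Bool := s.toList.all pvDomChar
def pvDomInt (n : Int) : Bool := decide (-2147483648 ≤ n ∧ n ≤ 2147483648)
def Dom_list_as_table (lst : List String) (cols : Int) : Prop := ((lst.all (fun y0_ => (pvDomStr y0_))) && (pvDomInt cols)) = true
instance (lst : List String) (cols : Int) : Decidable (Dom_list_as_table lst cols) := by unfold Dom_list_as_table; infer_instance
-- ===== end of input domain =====

-- B replaces A's element-by-element accumulator-and-counter loop with a recursive
-- chunker that slices off one full row at a time (objective: simpler).

-- ===== PORT A =====
-- one iteration of A's for-loop over state (res, col, ln)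
def pvStepA (cols : Int) (st : List String × Int × List String) (num : String) :
    List String × Int × List String :=
  let ln := st.2.2 ++ [num]
  let col := st.2.1 + 1
  if col ≥ cols then (st.1 ++ [PySem.Str.join "\t" ln], 0, ([] : List String))
  else (st.1, col, ln)

def list_as_table (lst : List String) (cols : Int) : String :=
  PySem.Str.join "\n" (lst.foldl (pvStepA cols) ([], 0, [])).1

-- ===== PORT B =====
-- the while-loop of Source B over state (i, rows); step ≥ 1 always at call sites, so
-- lst[i:i+step] is exactly (lst.drop i).take step; the `0` case is an
-- unreachable totality guard.
def pvLoopB : Nat → List String → Nat → List String → List String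
  | 0, _, _, rows => rows
  | sp+1, lst, i, rows =>
      if _h : i + (sp+1) ≤ lst.length then
        pvLoopB (sp+1) lst (i + (sp+1))
          (rows ++ [PySem.Str.join "\t" ((lst.drop i).take (sp+1))])
      else rows
termination_by _sp lst i _ => lst.length - i
decreasing_by omega

def list_as_table_alt (lst : List String) (cols : Int) : String :=
  PySem.Str.join "\n" (pvLoopB (if cols ≥ 1 then cols else 1).toNat lst 0 [])

-- ===== PRECONDITION & SPEC =====
def Spec_list_as_table (lst : List String) (cols : Int) (out : String) : Prop := out = list_as_table_alt lst cols
instance (lst : List String) (cols : Int) (out : String) : Decidable (Spec_list_as_table lst cols out) := by unfold Spec_list_as_table; infer_instance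

-- ===== CLAIM (what is proved, stated in full; the proofs are below) =====
def Claim_equal_list_as_table : Prop := ∀ (lst : List String) (cols : Int), Dom_list_as_table lst cols → Spec_list_as_table lst cols (list_as_table lst cols)

-- ===== LEMMAS AND PROOFS =====

-- proof helper: the rows B's loop produces, as structural recursion on the list
def pvRowsB : Nat → List String → List String
  | 0, _ => []
  | sp+1, lst =>
      if h : lst.length < sp + 1 then []
      else PySem.Str.join "\t" (lst.take (sp+1)) :: pvRowsB (sp+1) (lst.drop (sp+1))
termination_by _sp lst => lst.length
decreasing_by simp; omega

abbrev pvStepNat (cols : Int) : Nat := (if cols ≥ 1 then cols else 1).toNat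

theorem pvStepNat_pos (cols : Int) : 1 ≤ pvStepNat cols := by
  unfold pvStepNat; split <;> omega

theorem pvStepNat_cast (cols : Int) (h : cols ≥ 1) : (pvStepNat cols : Int) = cols := by
  unfold pvStepNat; rw [if_pos h]; omega

theorem pvStepNat_neg (cols : Int) (h : ¬ cols ≥ 1) : pvStepNat cols = 1 := by
  unfold pvStepNat; rw [if_neg h]; rfl

-- unreachable-else equation for pvRowsB
theorem pvRowsB_small (sp : Nat) (lst : List String) (h : lst.length < sp + 1) :
    pvRowsB (sp+1) lst = [] := by
  rw [pvRowsB]; simp [h]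

theorem pvRowsB_big (sp : Nat) (lst : List String) (h : ¬ lst.length < sp + 1) :
    pvRowsB (sp+1) lst =
      PySem.Str.join "\t" (lst.take (sp+1)) :: pvRowsB (sp+1) (lst.drop (sp+1)) := by
  rw [pvRowsB]; simp [h]

-- B's index loop accumulates exactly pvRowsB of the remaining suffix
theorem pvLoopB_eq (sp : Nat) (lst : List String) : ∀ (n i : Nat) (rows : List String),
    lst.length - i ≤ n → pvLoopB (sp+1) lst i rows = rows ++ pvRowsB (sp+1) (lst.drop i) := by
  intro n
  induction n with
  | zero =>
    intro i rows h
    rw [pvLoopB, pvRowsB_small sp (lst.drop i) (by simp; omega)]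
    simp; omega
  | succ m ih =>
    intro i rows h
    by_cases hc : i + (sp+1) ≤ lst.length
    · rw [pvLoopB]
      simp only [hc, dite_true]
      rw [ih (i + (sp+1)) _ (by omega),
        pvRowsB_big sp (lst.drop i) (by simp; omega)]
      simp [List.drop_drop]
    · rw [pvLoopB]
      simp only [hc, dite_false]
      rw [pvRowsB_small sp (lst.drop i) (by simp; omega)]
      simp

-- no flush happens while the partial row stays strictly shorter than the step
theorem pv_noflush (cols : Int) : ∀ (chunk ln res : List String),
    ln.length + chunk.length < pvStepNat cols →
    List.foldl (pvStepA cols) (res, (ln.length : Int), ln) chunk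
      = (res, ((ln.length + chunk.length : Nat) : Int), ln ++ chunk) := by
  intro chunk
  induction chunk with
  | nil => intro ln res h; simp
  | cons x tl ih =>
    intro ln res h
    have hnot : ¬ ((ln.length : Int) + 1 ≥ cols) := by
      by_cases hc : cols ≥ 1
      · have := pvStepNat_cast cols hc
        simp at h; omega
      · have := pvStepNat_neg cols hc
        simp at h; omega
    have hstep : pvStepA cols (res, (ln.length : Int), ln) x
        = (res, ((ln ++ [x]).length : Int), ln ++ [x]) := by
      simp [pvStepA, hnot]
    rw [List.foldl_cons, hstep, ih (ln ++ [x]) res (by simp at h ⊢; omega)]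
    simp [List.append_assoc]
    omega

-- a full chunk is flushed as one joined row, resetting the state
theorem pv_flush (cols : Int) : ∀ (chunk ln res : List String),
    chunk ≠ [] → ln.length + chunk.length = pvStepNat cols →
    List.foldl (pvStepA cols) (res, (ln.length : Int), ln) chunk
      = (res ++ [PySem.Str.join "\t" (ln ++ chunk)], 0, []) := by
  intro chunk
  induction chunk with
  | nil => intro ln res hne _; exact absurd rfl hne
  | cons x tl ih =>
    intro ln res _ hlen
    cases tl with
    | nil =>
      have hge : (ln.length : Int) + 1 ≥ cols := by
        by_cases hc : cols ≥ 1
        · have := pvStepNat_cast cols hc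
          simp at hlen; omega
        · omega
      simp [pvStepA, hge]
    | cons y tl' =>
      have hnot : ¬ ((ln.length : Int) + 1 ≥ cols) := by
        by_cases hc : cols ≥ 1
        · have := pvStepNat_cast cols hc
          simp at hlen; omega
        · have := pvStepNat_neg cols hc
          simp at hlen; omega
      have hstep : pvStepA cols (res, (ln.length : Int), ln) x
          = (res, ((ln ++ [x]).length : Int), ln ++ [x]) := by
        simp [pvStepA, hnot]
      rw [List.foldl_cons, hstep,
        ih (ln ++ [x]) res (by simp) (by simp at hlen ⊢; omega)]
      simp [List.append_assoc]

-- A's loop accumulates exactly B's rows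
theorem pv_main (cols : Int) : ∀ (n : Nat) (lst res : List String), lst.length ≤ n →
    (List.foldl (pvStepA cols) (res, 0, []) lst).1 = res ++ pvRowsB (pvStepNat cols) lst := by
  intro n
  induction n with
  | zero =>
    intro lst res h
    have : lst = [] := List.eq_nil_of_length_eq_zero (by omega)
    subst this
    obtain ⟨sp, hsp⟩ := Nat.exists_eq_add_of_le (pvStepNat_pos cols)
    rw [hsp, Nat.add_comm, pvRowsB_small sp [] (by simp)]
    simp
  | succ m ih =>
    intro lst res h
    obtain ⟨sp, hsp⟩ := Nat.exists_eq_add_of_le (pvStepNat_pos cols)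
    have hsp' : pvStepNat cols = sp + 1 := by omega
    rw [hsp']
    by_cases hlt : lst.length < sp + 1
    · have h0 := pv_noflush cols lst [] res (by rw [hsp']; simpa using hlt)
      simp at h0
      rw [pvRowsB_small sp lst hlt]
      simp [h0]
    · have hne : lst.take (sp+1) ≠ [] := by
        have hl : (lst.take (sp+1)).length = sp+1 := by rw [List.length_take]; omega
        intro hc; rw [hc] at hl; simp at hl
      have hflush := pv_flush cols (lst.take (sp+1)) [] res hne
        (by rw [hsp']; simp; omega)
      simp at hflush
      have hspl : lst = lst.take (sp+1) ++ lst.drop (sp+1) := by simp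
      conv_lhs => rw [hspl]
      rw [List.foldl_append, hflush,
        ih (lst.drop (sp+1)) (res ++ [PySem.Str.join "\t" (lst.take (sp+1))])
          (by simp; omega)]
      rw [pvRowsB_big sp lst hlt]
      simp [hsp']

-- ===== VERDICT (by name: the statement is the Claim_ definition above) =====
theorem list_as_table_spec : Claim_equal_list_as_table := by
  intro lst cols _
  unfold Spec_list_as_table list_as_table list_as_table_alt
  rw [pv_main cols lst.length lst [] le_rfl]
  obtain ⟨sp, hsp⟩ := Nat.exists_eq_add_of_le (pvStepNat_pos cols)
  have hsp' : pvStepNat cols = sp + 1 := by omega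
  have halt : (if cols ≥ 1 then cols else 1).toNat = pvStepNat cols := rfl
  rw [halt, hsp', pvLoopB_eq sp lst lst.length 0 [] (by omega)]
  simp
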